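-- pv_equiv track=rewrite | github.com/babkink/Project_3 | module_3_5.py | get_multiplied_digits
-- ===== SOURCE A (Python) =====
-- def get_multiplied_digits(number):
--     str_number = str(number)
--     first = int(str_number[0])
--     if first != 0:
--         if len(str_number) > 1:
--             return first * get_multiplied_digits(int(str_number[1:]))
--         else:
--             return first
--     else:
--         return 1
-- ===== SOURCE B (Python) =====
-- def get_multiplied_digits(number):
--     result = 1
--     n = number
--     while n > 0:
--         d = n % 10
--         if d != 0:
--             result *= d
--         n //= 10
--     return result
-- ===== Notes on version B (the rewrite author's own statement) =====
-- stated objective: alternative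
-- what changed: Replaces the string-slicing recursion (a str()/int() round-trip per digit) by a direct arithmetic loop that extracts each decimal digit with modulus and integer division and multiplies the nonzero ones; Pre_ excludes negative numbers, on which A raises ValueError (int of the sign character).
import Mathlib
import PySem

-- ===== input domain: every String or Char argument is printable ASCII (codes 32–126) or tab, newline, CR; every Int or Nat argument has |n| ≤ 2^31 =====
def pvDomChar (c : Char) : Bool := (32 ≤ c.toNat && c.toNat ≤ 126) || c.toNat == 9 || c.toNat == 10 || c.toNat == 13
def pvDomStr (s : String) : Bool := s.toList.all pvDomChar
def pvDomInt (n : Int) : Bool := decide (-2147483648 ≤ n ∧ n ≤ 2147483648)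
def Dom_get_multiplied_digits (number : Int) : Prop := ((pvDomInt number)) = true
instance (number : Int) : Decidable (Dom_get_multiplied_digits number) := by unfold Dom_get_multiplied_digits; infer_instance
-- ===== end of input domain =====

-- B replaces A's string-slicing recursion by an arithmetic digit loop (% 10, // 10); equal on all
-- nonnegative inputs (A raises ValueError on negatives, which Pre_ excludes).

-- ===== PORT A =====
-- A's `int(...)` is ported by a hand-written, step-for-step copy of CPython's int(str) acceptance
-- (strip whitespace, optional sign, digits with single underscores between digits); it computes the
-- same values as PySem.Int.ofStr?, whose parsing worker is a private constant that proofs cannot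
-- unfold, so the port carries its own exact copy of that worker instead.
def pvIsIntSpace (c : Char) : Bool :=
  c = ' ' || c = '\t' || c = '\n' || c = '\r' || c = '\x0b' || c = '\x0c'

def pvDigitsGo : List Char → Bool → Nat → Option Nat
  | [], afterDigit, acc => if afterDigit then some acc else none
  | c :: rest, afterDigit, acc =>
    if c.isDigit then pvDigitsGo rest true (acc * 10 + (c.toNat - '0'.toNat))
    else if c = '_' && afterDigit then
      match rest with
      | d :: _ => if d.isDigit then pvDigitsGo rest false acc else none
      | [] => none
    else none

def pvDigitsVal? (cs : List Char) : Option Nat :=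
  match cs with
  | [] => none
  | _ => pvDigitsGo cs false 0

def pvIntOfChars? (s : List Char) : Option Int :=
  match ((s.dropWhile pvIsIntSpace).reverse.dropWhile pvIsIntSpace).reverse with
  | [] => none
  | c :: rest =>
    if c = '-' then (pvDigitsVal? rest).map (fun a => -(a : Int))
    else if c = '+' then (pvDigitsVal? rest).map (fun a => (a : Int))
    else (pvDigitsVal? (c :: rest)).map (fun a => (a : Int))

-- A's recursion `get_multiplied_digits(int(str_number[1:]))` terminates because the digit string
-- shrinks with every call; the port makes that explicit with a fuel argument set to the initial
-- string length (a totality guard only; it never changes the value on inputs admitted by Pre_).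
-- str(number) is ported as PySem.Int.toChars (its character list; exact via PySem.Int.toList_toStr).
def gmdGo : Nat → Int → Int
  | 0, _ => 0
  | fuel+1, number =>
    let s := PySem.Int.toChars number           -- str_number = str(number)
    match PySem.List.pyGet? s 0 with            -- str_number[0]
    | none => 0                                  -- unreachable: str(number) is nonempty
    | some c =>
      match pvIntOfChars? [c] with               -- first = int(str_number[0])
      | none => 0                                -- ValueError (the '-' of a negative number)
      | some first =>
        if first ≠ 0 then
          if 1 < PySem.List.len s then           -- len(str_number) > 1
            match pvIntOfChars? (PySem.List.slice s (some 1) none) with   -- int(str_number[1:])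
            | none => 0
            | some t => first * gmdGo fuel t
          else first
        else 1

def get_multiplied_digits (number : Int) : Int :=
  gmdGo (PySem.Int.toChars number).length number

-- ===== PORT B =====
def gmdAltLoop (result : Int) (n : Int) : Int :=
  if _h : 0 < n then                             -- while n > 0
    let d := PySem.Int.mod n 10                  -- d = n % 10
    gmdAltLoop (if d ≠ 0 then result * d else result) (PySem.Int.floordiv n 10)   -- n //= 10
  else result
termination_by n.toNat
decreasing_by
  rw [PySem.Int.floordiv_eq_ediv_of_pos (by omega : (0:Int) < 10)]
  omega

def get_multiplied_digits_alt (number : Int) : Int :=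
  gmdAltLoop 1 number

-- ===== PRECONDITION & SPEC =====
-- Pre_ excludes exactly the negative numbers: there A raises ValueError (int() of the sign
-- character '-') and returns nothing.
def Pre_get_multiplied_digits (number : Int) : Prop := 0 ≤ number
instance (number : Int) : Decidable (Pre_get_multiplied_digits number) := by
  unfold Pre_get_multiplied_digits; infer_instance

def pvWitness_get_multiplied_digits : Int := 1056

def Spec_get_multiplied_digits (number : Int) (out : Int) : Prop := out = get_multiplied_digits_alt number
instance (number : Int) (out : Int) : Decidable (Spec_get_multiplied_digits number out) := by
  unfold Spec_get_multiplied_digits; infer_instance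

-- ===== CLAIM (what is proved, stated in full; the proofs are below) =====
def Claim_equal_get_multiplied_digits : Prop := ∀ (number : Int), Dom_get_multiplied_digits number → Pre_get_multiplied_digits number → Spec_get_multiplied_digits number (get_multiplied_digits number)

-- ===== LEMMAS AND PROOFS =====

-- The common value both programs compute: the product of the nonzero decimal digits.
def pvQ (m : Nat) : Int := (((Nat.digits 10 m).filter (fun d => d ≠ 0)).prod : Nat)

-- ---- B side: the arithmetic loop multiplies the nonzero digits ----
theorem gmdAltLoop_eq (m : Nat) : ∀ r : Int, gmdAltLoop r (m : Int) = r * pvQ m := by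
  induction m using Nat.strong_induction_on with
  | _ m ih =>
    intro r
    rw [gmdAltLoop]
    by_cases h0 : 0 < (m : Int)
    · have hm : 0 < m := by exact_mod_cast h0
      simp only [h0, dif_pos]
      have hmod : PySem.Int.mod (m : Int) 10 = ((m % 10 : Nat) : Int) := by
        exact_mod_cast PySem.Int.mod_natCast m 10
      have hdiv : PySem.Int.floordiv (m : Int) 10 = ((m / 10 : Nat) : Int) := by
        exact_mod_cast PySem.Int.floordiv_natCast m 10
      rw [hmod, hdiv, ih (m / 10) (Nat.div_lt_self hm (by omega))]
      have hdig : Nat.digits 10 m = m % 10 :: Nat.digits 10 (m / 10) :=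
        Nat.digits_def' (by omega) hm
      unfold pvQ
      rw [hdig]
      by_cases hz : m % 10 = 0
      · simp [hz]
      · have hne : ((m % 10 : Nat) : Int) ≠ 0 := by exact_mod_cast hz
        rw [if_pos hne, List.filter_cons_of_pos (by simpa using hz), List.prod_cons]
        push_cast
        ring
    · have : m = 0 := by omega
      subst this
      simp only [h0, dif_neg, not_false_iff]
      simp [pvQ]

-- ---- digit characters ----
theorem pvDigitChar_facts (d : Nat) (h : d < 10) :
    (Nat.digitChar d).isDigit = true ∧ pvIsIntSpace (Nat.digitChar d) = false ∧
    Nat.digitChar d ≠ '-' ∧ Nat.digitChar d ≠ '+' ∧ (Nat.digitChar d).toNat - '0'.toNat = d := by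
  interval_cases d <;> decide

-- ---- the hand-ported int() on pure digit strings ----
theorem pvDigitsGo_digits (ds : List Char) : ∀ a : Nat, (∀ c ∈ ds, c.isDigit = true) →
    pvDigitsGo ds true a = some (ds.foldl (fun x c => x * 10 + (c.toNat - '0'.toNat)) a) := by
  induction ds with
  | nil => intro a _; simp [pvDigitsGo]
  | cons c rest ih =>
    intro a h
    have hc : c.isDigit = true := h c (by simp)
    simp only [pvDigitsGo, hc, if_pos, List.foldl_cons]
    exact ih _ (fun x hx => h x (by simp [hx]))

theorem pvIntOfChars?_digits (ds : List Char)
    (hd : ∀ c ∈ ds, c.isDigit = true ∧ pvIsIntSpace c = false ∧ c ≠ '-' ∧ c ≠ '+')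
    (hne : ds ≠ []) :
    pvIntOfChars? ds = some ((ds.foldl (fun x c => x * 10 + (c.toNat - '0'.toNat)) 0 : Nat) : Int) := by
  have h1 : ds.dropWhile pvIsIntSpace = ds := by
    cases ds with
    | nil => simp
    | cons c rest =>
      rw [List.dropWhile_cons_of_neg]
      simp [(hd c (by simp)).2.1]
  have h2 : ds.reverse.dropWhile pvIsIntSpace = ds.reverse := by
    cases hrev : ds.reverse with
    | nil => simp
    | cons c rest =>
      rw [List.dropWhile_cons_of_neg]
      have : c ∈ ds := by
        have : c ∈ ds.reverse := by rw [hrev]; simp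
        simpa using this
      simp [(hd c this).2.1]
  obtain ⟨c, rest, rfl⟩ : ∃ c rest, ds = c :: rest := by
    cases ds with
    | nil => exact absurd rfl hne
    | cons c rest => exact ⟨c, rest, rfl⟩
  obtain ⟨hcd, -, hcm, hcp⟩ := hd c (by simp)
  simp only [pvIntOfChars?, h1, h2, List.reverse_reverse]
  rw [if_neg hcm, if_neg hcp]
  simp only [pvDigitsVal?]
  simp only [pvDigitsGo, hcd, if_pos, Nat.zero_mul, Nat.zero_add]
  rw [pvDigitsGo_digits rest _ (fun x hx => (hd x (by simp [hx])).1)]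
  simp

theorem pvFoldl_rev_map (l : List Nat) (hl : ∀ d ∈ l, d < 10) : ∀ a : Nat,
    ((l.map Nat.digitChar).reverse).foldl (fun x c => x * 10 + (c.toNat - '0'.toNat)) a =
      a * 10 ^ l.length + Nat.ofDigits 10 l := by
  induction l with
  | nil => intro a; simp
  | cons d t ih =>
    intro a
    have hd : d < 10 := hl d (by simp)
    have hv : (Nat.digitChar d).toNat - '0'.toNat = d := (pvDigitChar_facts d hd).2.2.2.2
    simp only [List.map_cons, List.reverse_cons, List.foldl_append, List.foldl_cons, List.foldl_nil]
    rw [ih (fun x hx => hl x (by simp [hx])) a, hv, Nat.ofDigits_cons]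
    simp only [List.length_cons, pow_succ]
    ring

-- ---- str(number): Nat.toDigits in terms of Nat.digits ----
theorem pvToCharsCore (fuel : Nat) : ∀ (m : Nat) (acc : List Char), 0 < m → m < fuel →
    Nat.toDigitsCore 10 fuel m acc = ((Nat.digits 10 m).map Nat.digitChar).reverse ++ acc := by
  induction fuel with
  | zero => intro m acc h1 h2; omega
  | succ fuel ih =>
    intro m acc h1 h2
    rw [Nat.toDigitsCore]
    have hdig : Nat.digits 10 m = m % 10 :: Nat.digits 10 (m / 10) := Nat.digits_def' (by omega) h1
    by_cases hq : m / 10 = 0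
    · simp [hq, hdig]
    · simp only [hq, if_false]
      rw [ih (m / 10) _ (by omega) (by omega), hdig]
      simp

theorem pvToChars_natCast (m : Nat) :
    PySem.Int.toChars (m : Int) =
      if m = 0 then ['0'] else ((Nat.digits 10 m).map Nat.digitChar).reverse := by
  by_cases h : m = 0
  · subst h; decide
  · rw [if_neg h]
    show (if (m : Int) < 0 then _ else Nat.toDigits 10 (m : Int).toNat) = _
    rw [if_neg (by omega)]
    show Nat.toDigits 10 m = _
    rw [Nat.toDigits, pvToCharsCore (m+1) m [] (by omega) (by omega)]
    simp

theorem pvToChars_len_pos (m : Nat) : 0 < (PySem.Int.toChars (m : Int)).length := by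
  rw [pvToChars_natCast]
  by_cases h : m = 0
  · simp [h]
  · simp only [h, if_false]
    simp [List.length_pos_iff, Nat.digits_ne_nil_iff_ne_zero, h]

theorem pvQ_ofDigits : ∀ l : List Nat, (∀ d ∈ l, d < 10) →
    pvQ (Nat.ofDigits 10 l) = ((l.filter (fun d => d ≠ 0)).prod : Nat) := by
  intro l
  induction l using List.reverseRecOn with
  | nil => intro _; simp [pvQ]
  | append_singleton t d ih =>
    intro h
    by_cases hd : d = 0
    · subst hd
      have hv : Nat.ofDigits 10 (t ++ [0]) = Nat.ofDigits 10 t := by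
        rw [Nat.ofDigits_append]; simp
      have hf : List.filter (fun d => decide (d ≠ 0)) (t ++ [0]) =
          List.filter (fun d => decide (d ≠ 0)) t := by
        rw [List.filter_append]; simp
      rw [hv, hf, ih (fun x hx => h x (by simp [hx]))]
    · unfold pvQ
      rw [Nat.digits_ofDigits 10 (by omega) _ (fun x hx => h x hx)
        (fun hne => by simpa [List.getLast_append] using hd)]

theorem pvSingleDigit (d : Nat) (h : d < 10) :
    pvIntOfChars? [Nat.digitChar d] = some (d : Int) := by
  obtain ⟨h1, h2, h3, h4, h5⟩ := pvDigitChar_facts d h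
  rw [pvIntOfChars?_digits [Nat.digitChar d] (by simp [h1, h2, h3, h4]) (by simp)]
  have h5' : (Nat.digitChar d).toNat - 48 = d := h5
  simp [h5']

-- ---- A side: the string recursion multiplies the nonzero digits ----
theorem gmdGo_eq : ∀ (fuel : Nat) (m : Nat), (PySem.Int.toChars (m : Int)).length ≤ fuel →
    gmdGo fuel (m : Int) = pvQ m := by
  intro fuel
  induction fuel with
  | zero =>
    intro m hle
    have := pvToChars_len_pos m
    omega
  | succ fuel ih =>
    intro m hle
    by_cases h0 : m = 0
    · subst h0
      rw [gmdGo]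
      have hz : PySem.Int.toChars ((0 : Nat) : Int) = ['0'] := rfl
      simp only [hz, PySem.List.pyGet?_zero_cons]
      have : pvIntOfChars? ['0'] = some 0 := by decide
      simp only [this]
      norm_num
      decide
    · have hchars : PySem.Int.toChars (m : Int) = ((Nat.digits 10 m).map Nat.digitChar).reverse := by
        rw [pvToChars_natCast, if_neg h0]
      have hdne : Nat.digits 10 m ≠ [] := Nat.digits_ne_nil_iff_ne_zero.mpr h0
      obtain ⟨dl, ld, hsplit⟩ : ∃ t d, Nat.digits 10 m = t ++ [d] := by
        generalize hl : Nat.digits 10 m = l at hdne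
        induction l using List.reverseRecOn with
        | nil => exact absurd rfl hdne
        | append_singleton t d _ => exact ⟨t, d, rfl⟩
      have hld : ld ≠ 0 := by
        have := Nat.getLast_digit_ne_zero 10 h0
        simpa [hsplit, List.getLast_append] using this
      have hlt10 : ∀ x ∈ Nat.digits 10 m, x < 10 := fun x hx => Nat.digits_lt_base (by omega) hx
      have hldlt : ld < 10 := hlt10 ld (by simp [hsplit])
      have hdllt : ∀ x ∈ dl, x < 10 := fun x hx => hlt10 x (by simp [hsplit, hx])
      have hs : PySem.Int.toChars (m : Int) = Nat.digitChar ld :: (dl.map Nat.digitChar).reverse := by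
        rw [hchars, hsplit]; simp
      rw [gmdGo]
      simp only [hs, PySem.List.pyGet?_zero_cons]
      simp only [pvSingleDigit ld hldlt]
      rw [if_pos (by exact_mod_cast hld : ((ld : Int) ≠ 0))]
      simp only [PySem.List.len_eq, List.length_cons, List.length_reverse, List.length_map]
      by_cases hdl : dl = []
      · -- single digit: m = ld
        subst hdl
        rw [if_neg (by simp)]
        have hm : m = ld := by
          have := Nat.ofDigits_digits 10 m
          rw [hsplit] at this
          simpa using this.symm
        unfold pvQ
        subst hm
        rw [hsplit]
        simp [hld]
      · have hpos : 0 < dl.length := List.length_pos_iff.mpr hdl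
        rw [if_pos (by exact_mod_cast (by omega : (1:Int) < ((dl.length + 1 : Nat) : Int)))]
        have hslice : PySem.List.slice (Nat.digitChar ld :: (dl.map Nat.digitChar).reverse) (some 1) none
            = (dl.map Nat.digitChar).reverse := by
          have h1 : (1 : Int) = ((1 : Nat) : Int) := by norm_num
          rw [h1, PySem.List.slice_from_natCast]
          simp
        rw [hslice]
        have hmem : ∀ c ∈ (dl.map Nat.digitChar).reverse,
            c.isDigit = true ∧ pvIsIntSpace c = false ∧ c ≠ '-' ∧ c ≠ '+' := by
          intro c hc
          simp only [List.mem_reverse, List.mem_map] at hc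
          obtain ⟨x, hx, rfl⟩ := hc
          obtain ⟨a1, a2, a3, a4, -⟩ := pvDigitChar_facts x (hdllt x hx)
          exact ⟨a1, a2, a3, a4⟩
        rw [pvIntOfChars?_digits _ hmem (by simpa using hdl)]
        rw [pvFoldl_rev_map dl hdllt 0]
        simp only [Nat.zero_mul, Nat.zero_add]
        set t := Nat.ofDigits 10 dl with ht
        have htlen : (PySem.Int.toChars (t : Int)).length ≤ fuel := by
          by_cases ht0 : t = 0
          · rw [pvToChars_natCast, if_pos ht0]
            have : dl.length + 1 ≤ fuel + 1 := by
              have := hle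
              rw [hs] at this
              simpa using this
            simp; omega
          · rw [pvToChars_natCast, if_neg ht0]
            have hlt : t < 10 ^ dl.length := by
              have := Nat.ofDigits_lt_base_pow_length' (b := 8) (l := dl) (by simpa using hdllt)
              simpa using this
            have hlen2 : (Nat.digits 10 t).length ≤ dl.length :=
              (Nat.digits_length_le_iff (by omega) t).mpr hlt
            have : dl.length + 1 ≤ fuel + 1 := by
              have := hle; rw [hs] at this; simpa using this
            simp only [List.length_reverse, List.length_map]
            omega
        rw [ih t htlen]
        rw [pvQ_ofDigits dl hdllt]
        unfold pvQ
        rw [hsplit, List.filter_append]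
        simp only [List.filter_cons, List.filter_nil]
        have : (fun d => decide (d ≠ 0)) ld = true := by simpa using hld
        simp only [this, if_pos]
        rw [List.prod_append]
        push_cast
        simp [mul_comm]

-- ===== VERDICT (by name: the statement is the Claim_ definition above) =====
theorem get_multiplied_digits_spec : Claim_equal_get_multiplied_digits := by
  intro number _hdom hpre
  unfold Spec_get_multiplied_digits
  have hm : number = ((number.toNat : Nat) : Int) := (Int.toNat_of_nonneg hpre).symm
  rw [hm]
  unfold get_multiplied_digits get_multiplied_digits_alt
  rw [gmdGo_eq _ _ (le_refl _), gmdAltLoop_eq, one_mul]
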